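-- pv_equiv track=rewrite | github.com/HyunSung-Na/TIL-algorism | 알고리즘/라인_코테2.py | solution
-- ===== SOURCE A (Python) =====
-- from collections import deque
--
-- def solution(ball, order):
--     answer = []
--     queue = deque(ball)
--     order = deque(order)
--     while queue:
--         first_ball = queue[0]
--         last_ball = queue[-1]
--         for index in range(len(order)):
--             orderball = order[index]
--             if orderball == first_ball:
--                 queue.popleft()
--                 answer.append(orderball)
--                 break
--             elif orderball == last_ball:
--                 queue.pop()
--                 answer.append(orderball)
--                 break
--     return answer
-- ===== SOURCE B (Python) =====
-- from collections import deque
--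
-- def solution(ball, order):
--     # Precompute each value's first position in `order`; at every step compare
--     # the two ends' positions instead of rescanning `order`.
--     rank = {}
--     for i, v in enumerate(order):
--         rank.setdefault(v, i)
--     inf = len(order)
--     q = deque(ball)
--     answer = []
--     while q:
--         if rank.get(q[0], inf) <= rank.get(q[-1], inf):
--             answer.append(q.popleft())
--         else:
--             answer.append(q.pop())
--     return answer
-- ===== Notes on version B (the rewrite author's own statement) =====
-- stated objective: alternative
-- what changed: Instead of rescanning the whole order list from the start on every pop, B builds a first-occurrence index dict of order once and then decides each pop by comparing the two ends' first-occurrence indices with two dict lookups.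
import Mathlib
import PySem

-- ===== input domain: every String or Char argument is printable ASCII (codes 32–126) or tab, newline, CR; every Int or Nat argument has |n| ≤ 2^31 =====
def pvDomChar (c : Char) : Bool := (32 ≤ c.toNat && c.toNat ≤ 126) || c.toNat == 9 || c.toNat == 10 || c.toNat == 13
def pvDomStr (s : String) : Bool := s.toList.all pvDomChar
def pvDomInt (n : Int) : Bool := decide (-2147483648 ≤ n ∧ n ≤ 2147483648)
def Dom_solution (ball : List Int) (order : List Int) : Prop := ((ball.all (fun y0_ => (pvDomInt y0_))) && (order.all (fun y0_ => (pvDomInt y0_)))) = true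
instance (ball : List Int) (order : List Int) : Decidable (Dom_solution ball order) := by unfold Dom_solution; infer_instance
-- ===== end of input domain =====

-- B replaces A's per-step rescan of `order` with a first-occurrence index dict built once (a different algorithm of lower asymptotic cost; not confirmed faster in a timing run, whose random inputs make A diverge).

-- ===== PORT A =====
-- A's inner `for index in range(len(order))`: first element of `order` equal to the
-- front (some true) or back (some false) of the queue; none = no match found.
def scanA (order : List Int) (f l : Int) : Option Bool :=
  match order with
  | [] => none
  | o :: rest => if o = f then some true else if o = l then some false else scanA rest f l

-- A's `while queue:` loop; the `none` branch is unreachable under Pre_ (Python loops forever there).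
def loopA (order : List Int) : List Int → List Int → List Int
  | [], ans => ans
  | x :: xs, ans =>
    match scanA order x ((x :: xs).getLast (by simp)) with
    | some true  => loopA order xs (ans ++ [x])
    | some false => loopA order (x :: xs).dropLast (ans ++ [(x :: xs).getLast (by simp)])
    | none => ans
termination_by q _ => q.length
decreasing_by all_goals simp

def solution (ball : List Int) (order : List Int) : List Int :=
  loopA order ball []

-- ===== PORT B =====
-- rank.setdefault(v, i) over enumerate(order)
def rankOf (order : List Int) : PySem.Dict Int Int :=
  (PySem.List.enumerate order).foldl (fun d p => d.setdefault p.2 p.1) PySem.Dict.empty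

-- B's `while q:` loop: compare the two ends' first-occurrence indices in `order`.
def loopB (rank : PySem.Dict Int Int) (inf : Int) : List Int → List Int
  | [] => []
  | x :: xs =>
    if rank.getD x inf ≤ rank.getD ((x :: xs).getLast (by simp)) inf then
      x :: loopB rank inf xs
    else
      (x :: xs).getLast (by simp) :: loopB rank inf (x :: xs).dropLast
termination_by q => q.length
decreasing_by all_goals simp

def solution_alt (ball : List Int) (order : List Int) : List Int :=
  loopB (rankOf order) (order.length : Int) ball

-- ===== PRECONDITION & SPEC =====
-- Pre_ excludes exactly the inputs where some ball value never occurs in `order`: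
-- there A's while-loop finds no match and loops FOREVER (A never returns a value).
def Pre_solution (ball : List Int) (order : List Int) : Prop :=
  ball.all (fun b => order.contains b) = true
instance (ball : List Int) (order : List Int) : Decidable (Pre_solution ball order) := by
  unfold Pre_solution; infer_instance
def pvWitness_solution : List Int × List Int := ([1, 2, 3, 2], [2, 1, 3])

def Spec_solution (ball : List Int) (order : List Int) (out : List Int) : Prop := out = solution_alt ball order
instance (ball : List Int) (order : List Int) (out : List Int) : Decidable (Spec_solution ball order out) := by unfold Spec_solution; infer_instance

-- ===== CLAIM (what is proved, stated in full; the proofs are below) =====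
def Claim_equal_solution : Prop := ∀ (ball : List Int) (order : List Int), Dom_solution ball order → Pre_solution ball order → Spec_solution ball order (solution ball order)

-- ===== LEMMAS AND PROOFS =====

-- first index ≥ s at which v occurs in the list (specification device for both ports)
def firstIdx : List Int → Int → Int → Option Int
  | [], _, _ => none
  | x :: xs, s, v => if x = v then some s else firstIdx xs (s + 1) v

theorem firstIdx_of_mem : ∀ (xs : List Int) (s v : Int), v ∈ xs →
    ∃ r, firstIdx xs s v = some r ∧ s ≤ r := by
  intro xs
  induction xs with
  | nil => intro s v h; simp at h
  | cons x xs ih =>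
    intro s v h
    by_cases hx : x = v
    · exact ⟨s, by simp [firstIdx, hx], le_refl s⟩
    · have hv : v ∈ xs := by cases h with
        | head => exact absurd rfl hx
        | tail _ h => exact h
      obtain ⟨r, hr, hsr⟩ := ih (s + 1) v hv
      exact ⟨r, by simp [firstIdx, hx, hr], by omega⟩

theorem get?_setdefault (d : PySem.Dict Int Int) (k v x : Int) :
    (d.setdefault k v).get? x = (d.get? x).or (if k = x then some v else none) := by
  by_cases hc : d.contains k = true
  · simp [PySem.Dict.setdefault, hc]
    by_cases hkx : k = x
    · subst hkx
      have h := PySem.Dict.contains_eq_isSome_get? d k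
      rw [hc] at h
      cases hg : d.get? k with
      | none => rw [hg] at h; simp at h
      | some w => simp
    · simp [hkx]
  · simp only [PySem.Dict.setdefault, hc]
    simp [PySem.Dict.get?, List.find?_append]
    cases hg : List.find? (fun p => p.1 == k) d.items with
    | some w =>
      have : d.contains k = true := by
        have h := PySem.Dict.contains_eq_isSome_get? d k
        simp [PySem.Dict.get?, hg] at h
        exact h
      exact absurd this hc
    | none =>
      cases hf : List.find? (fun p => p.1 == x) d.items with
      | some w => simp
      | none =>
        by_cases hkx : k = x <;> simp [hkx]

theorem rank_fold_get? : ∀ (xs : List Int) (s : Int) (d : PySem.Dict Int Int) (v : Int),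
    ((PySem.List.enumerate xs s).foldl (fun d p => d.setdefault p.2 p.1) d).get? v
      = (d.get? v).or (firstIdx xs s v) := by
  intro xs
  induction xs with
  | nil => intro s d v; simp [PySem.List.enumerate_nil, firstIdx]
  | cons x xs ih =>
    intro s d v
    rw [PySem.List.enumerate_cons]
    simp only [List.foldl_cons]
    rw [ih (s + 1) (d.setdefault x s) v, get?_setdefault]
    simp only [firstIdx]
    by_cases hx : x = v
    · simp [hx]
    · simp [hx]

theorem rank_get? (order : List Int) (v : Int) :
    (rankOf order).get? v = firstIdx order 0 v := by
  rw [rankOf, rank_fold_get?]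
  simp [PySem.Dict.get?_empty]

theorem scanA_eq : ∀ (order : List Int) (s f l : Int), f ∈ order → l ∈ order →
    scanA order f l
      = some (decide ((firstIdx order s f).getD 0 ≤ (firstIdx order s l).getD 0)) := by
  intro order
  induction order with
  | nil => intro s f l hf; simp at hf
  | cons o rest ih =>
    intro s f l hf hl
    by_cases hof : o = f
    · subst hof
      have h1 : firstIdx (o :: rest) s o = some s := by simp [firstIdx]
      by_cases hol : o = l
      · subst hol
        simp [scanA, h1]
      · have hlr : l ∈ rest := by cases hl with
          | head => exact absurd rfl hol
          | tail _ h => exact h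
        obtain ⟨r, hr, hsr⟩ := firstIdx_of_mem rest (s + 1) l hlr
        have h2 : firstIdx (o :: rest) s l = some r := by simp [firstIdx, hol, hr]
        rw [h1, h2]
        simp [scanA]
        omega
    · by_cases hol : o = l
      · subst hol
        have hfr : f ∈ rest := by cases hf with
          | head => exact absurd rfl hof
          | tail _ h => exact h
        obtain ⟨r, hr, hsr⟩ := firstIdx_of_mem rest (s + 1) f hfr
        have h1 : firstIdx (o :: rest) s f = some r := by simp [firstIdx, hof, hr]
        have h2 : firstIdx (o :: rest) s o = some s := by simp [firstIdx]
        rw [h1, h2]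
        simp [scanA, hof]
        omega
      · have hfr : f ∈ rest := by cases hf with
          | head => exact absurd rfl hof
          | tail _ h => exact h
        have hlr : l ∈ rest := by cases hl with
          | head => exact absurd rfl hol
          | tail _ h => exact h
        have h1 : firstIdx (o :: rest) s f = firstIdx rest (s + 1) f := by
          simp [firstIdx, hof]
        have h2 : firstIdx (o :: rest) s l = firstIdx rest (s + 1) l := by
          simp [firstIdx, hol]
        rw [h1, h2]
        simp only [scanA, if_neg hof, if_neg hol]
        exact ih (s + 1) f l hfr hlr

theorem rank_getD_of_mem (order : List Int) (inf v : Int) (h : v ∈ order) :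
    (rankOf order).getD v inf = (firstIdx order 0 v).getD 0 := by
  obtain ⟨r, hr, _⟩ := firstIdx_of_mem order 0 v h
  rw [PySem.Dict.getD, rank_get?, hr]
  simp

theorem loop_eq (order : List Int) : ∀ (n : Nat) (q : List Int), q.length ≤ n →
    ∀ (ans : List Int), (∀ b ∈ q, b ∈ order) →
    loopA order q ans = ans ++ loopB (rankOf order) (order.length : Int) q := by
  intro n
  induction n with
  | zero =>
    intro q hq ans _
    have : q = [] := List.eq_nil_of_length_eq_zero (Nat.le_zero.mp hq)
    subst this
    simp [loopA, loopB]
  | succ n ih =>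
    intro q hq ans hmem
    match q with
    | [] => simp [loopA, loopB]
    | x :: xs =>
      have hx : x ∈ order := hmem x (by simp)
      have hl : (x :: xs).getLast (by simp) ∈ order :=
        hmem _ (List.getLast_mem (by simp))
      rw [loopA, scanA_eq order 0 x ((x :: xs).getLast (by simp)) hx hl]
      rw [loopB]
      rw [rank_getD_of_mem order _ x hx, rank_getD_of_mem order _ _ hl]
      by_cases hle :
          (firstIdx order 0 x).getD 0 ≤ (firstIdx order 0 ((x :: xs).getLast (by simp))).getD 0
      · simp only [hle, decide_true]
        rw [ih xs (by simp at hq ⊢; omega) (ans ++ [x])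
            (fun b hb => hmem b (List.mem_cons_of_mem x hb))]
        simp
      · simp only [hle, decide_false]
        rw [ih (x :: xs).dropLast (by simp at hq ⊢; omega) _
            (fun b hb => hmem b (List.mem_of_mem_dropLast hb))]
        simp

-- ===== VERDICT (by name: the statement is the Claim_ definition above) =====
theorem solution_spec : Claim_equal_solution := by
  intro ball order _ hpre
  unfold Spec_solution solution solution_alt
  have h : ∀ b ∈ ball, b ∈ order := by
    intro b hb
    have := List.all_eq_true.mp hpre b hb
    simpa using this
  exact (loop_eq order ball.length ball (le_refl _) [] h).trans (by simp)
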